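-- pv_equiv track=rewrite | github.com/raeez/chiral-bar-cobar | compute/lib/bar_cohomology_dimensions.py | _sl3_modes_at_weight
-- ===== SOURCE A (Python) =====
-- from typing import Dict, List, Optional, Tuple, Any
--
-- def _sl3_modes_at_weight(h: int) -> List[Tuple[Tuple[int, int], ...]]:
--     """PBW basis states of affine sl_3 at weight h.
--
--     sl_3 has 8 generators (dimension 8): E_{12}, E_{13}, E_{21}, E_{23},
--     E_{31}, E_{32}, H_1, H_2 (Chevalley basis + off-diagonal).
--
--     We use indices 0-7 for the generators.
--     Modes: X^a_{-n} for a in {0,...,7}, n >= 1, weight n.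
--     """
--     n_gens = 8
--
--     def _gen_states(remaining, max_pair):
--         if remaining == 0:
--             yield ()
--             return
--         for level in range(min(remaining, max_pair[1] if max_pair else remaining), 0, -1):
--             max_gen = max_pair[0] if (max_pair and level == max_pair[1]) else n_gens - 1
--             for gen_idx in range(max_gen, -1, -1):
--                 pair = (gen_idx, level)
--                 for rest in _gen_states(remaining - level, pair):
--                     yield (pair,) + rest
--
--     return list(_gen_states(h, None))
-- ===== SOURCE B (Python) =====
-- from typing import List, Tuple
--
-- def _sl3_modes_at_weight(h: int) -> List[Tuple[Tuple[int, int], ...]]: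
--     """Iterative DFS with an explicit stack instead of nested recursive generators."""
--     n_gens = 8
--     results = []
--     stack = [((), h, None)]  # (pairs built so far, remaining weight, max_pair constraint)
--     while stack:
--         acc, remaining, max_pair = stack.pop()
--         if remaining == 0:
--             results.append(acc)
--             continue
--         children = []
--         for level in range(min(remaining, max_pair[1] if max_pair else remaining), 0, -1):
--             max_gen = max_pair[0] if (max_pair and level == max_pair[1]) else n_gens - 1
--             for gen_idx in range(max_gen, -1, -1):
--                 pair = (gen_idx, level)
--                 children.append((acc + (pair,), remaining - level, pair))
--         stack.extend(reversed(children))  # LIFO pop then visits children in order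
--     return results
-- ===== Notes on version B (the rewrite author's own statement) =====
-- stated objective: alternative
-- what changed: Replaces A's nested recursive generators with an iterative depth-first search driven by an explicit stack of partial states (accumulated pairs, remaining weight, max-pair constraint), pushing children in reverse so LIFO popping reproduces A's exact emission order.
import Mathlib
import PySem

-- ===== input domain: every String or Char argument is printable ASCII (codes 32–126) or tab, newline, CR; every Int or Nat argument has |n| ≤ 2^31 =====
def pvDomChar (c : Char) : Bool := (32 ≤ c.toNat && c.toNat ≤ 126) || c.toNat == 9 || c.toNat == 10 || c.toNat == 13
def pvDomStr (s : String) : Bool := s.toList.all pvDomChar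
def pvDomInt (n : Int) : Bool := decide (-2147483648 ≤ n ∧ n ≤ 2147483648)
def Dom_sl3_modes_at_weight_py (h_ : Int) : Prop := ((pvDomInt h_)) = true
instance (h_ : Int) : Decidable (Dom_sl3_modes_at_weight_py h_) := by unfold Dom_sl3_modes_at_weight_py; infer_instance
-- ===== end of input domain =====

-- B replaces A's nested recursive generators by an iterative DFS over an explicit stack (same emission order); objective: alternative decomposition, no speed claim.

-- ===== PORT A =====
-- A's inner recursive generator `_gen_states(remaining, max_pair)`, emitting in DFS order.
-- The Nat fuel is only a totality guard: each recursive call decreases `remaining` by the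
-- popped level ≥ 1, so fuel `remaining.toNat + 1` (used at the entry point) is never exhausted.
def pvGenStates (fuel : Nat) (remaining : Int) (maxPair : Option (Int × Int)) : List (List (Int × Int)) :=
  match fuel with
  | 0 => []
  | fuel + 1 =>
    if remaining = 0 then [[]]
    else
      (PySem.List.pyRange
          (min remaining (match maxPair with | some p => p.2 | none => remaining)) 0 (-1)).flatMap
        (fun level =>
          (PySem.List.pyRange
              (match maxPair with
               | some p => if level = p.2 then p.1 else 8 - 1
               | none => 8 - 1) (-1) (-1)).flatMap
            (fun gen_idx =>
              (pvGenStates fuel (remaining - level) (some (gen_idx, level))).map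
                (fun rest => (gen_idx, level) :: rest)))

def sl3_modes_at_weight_py (h_ : Int) : List (List (Int × Int)) :=
  pvGenStates (h_.toNat + 1) h_ none

-- ===== PORT B =====
-- Potential of a stack entry's constraint and of a stack; 9^remaining strictly dominates the
-- total potential of an entry's children, so pvMeasure of the start stack bounds the number of
-- loop iterations — it is B's fuel (again only a totality guard for the Python while-loop).
def pvPot : Option (Int × Int) → Nat
  | none => 9
  | some p => max (p.1.toNat + 2) 9

def pvMeasure (stack : List (List (Int × Int) × Int × Option (Int × Int))) : Nat :=
  (stack.map (fun e => (pvPot e.2.2) ^ e.2.1.toNat)).sum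

-- Iterative DFS: the Lean list's head is the Python list's end (the stack top), so popping is
-- taking the head and Python's `stack.extend(reversed(children))` is `children ++ rest` here.
def pvRunStack (fuel : Nat) (stack : List (List (Int × Int) × Int × Option (Int × Int)))
    (results : List (List (Int × Int))) : List (List (Int × Int)) :=
  match fuel with
  | 0 => results
  | fuel + 1 =>
    match stack with
    | [] => results
    | (acc, remaining, maxPair) :: rest =>
      if remaining = 0 then
        pvRunStack fuel rest (results ++ [acc])
      else
        pvRunStack fuel
          (((PySem.List.pyRange
                (min remaining (match maxPair with | some p => p.2 | none => remaining)) 0 (-1)).flatMap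
              (fun level =>
                (PySem.List.pyRange
                    (match maxPair with
                     | some p => if level = p.2 then p.1 else 8 - 1
                     | none => 8 - 1) (-1) (-1)).map
                  (fun gen_idx => (acc ++ [(gen_idx, level)], remaining - level, some (gen_idx, level)))))
            ++ rest) results

def sl3_modes_at_weight_py_alt (h_ : Int) : List (List (Int × Int)) :=
  pvRunStack (pvMeasure [([], h_, none)]) [([], h_, none)] []

-- ===== PRECONDITION & SPEC =====
def Spec_sl3_modes_at_weight_py (h_ : Int) (out : List (List (Int × Int))) : Prop := out = sl3_modes_at_weight_py_alt h_
instance (h_ : Int) (out : List (List (Int × Int))) : Decidable (Spec_sl3_modes_at_weight_py h_ out) := by unfold Spec_sl3_modes_at_weight_py; infer_instance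

-- ===== CLAIM (what is proved, stated in full; the proofs are below) =====
def Claim_equal_sl3_modes_at_weight_py : Prop := ∀ (h_ : Int), Dom_sl3_modes_at_weight_py h_ → Spec_sl3_modes_at_weight_py h_ (sl3_modes_at_weight_py h_)

-- ===== LEMMAS AND PROOFS =====

theorem pvPot_ge (mp : Option (Int × Int)) : 9 ≤ pvPot mp := by
  cases mp with
  | none => decide
  | some p => show 9 ≤ max (p.1.toNat + 2) 9; omega

theorem pvMeasure_append (xs ys : List (List (Int × Int) × Int × Option (Int × Int))) :
    pvMeasure (xs ++ ys) = pvMeasure xs + pvMeasure ys := by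
  simp [pvMeasure]

theorem pvMeasure_cons (acc : List (Int × Int)) (rem : Int) (mp : Option (Int × Int))
    (ys : List (List (Int × Int) × Int × Option (Int × Int))) :
    pvMeasure ((acc, rem, mp) :: ys) = pvPot mp ^ rem.toNat + pvMeasure ys := by
  simp [pvMeasure]

-- Geometric bound: the children of one entry weigh at most G^rem - G^(rem-L).
theorem pvChildrenLe (G : Nat) (rem : Int) (mg : Int → Int) (f : Int → Int → List (Int × Int))
    (hG : 9 ≤ G) (hmg : ∀ l, (mg l).toNat + 2 ≤ G) :
    ∀ (Ln : Nat) (L : Int), L = (Ln : Int) → L ≤ rem →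
    pvMeasure ((PySem.List.pyRange L 0 (-1)).flatMap
        (fun l => (PySem.List.pyRange (mg l) (-1) (-1)).map
          (fun g => (f l g, rem - l, some (g, l)))))
      + G ^ ((rem - L).toNat) ≤ G ^ rem.toNat := by
  intro Ln
  induction Ln with
  | zero =>
    intro L hL hle
    have hL0 : L = 0 := by exact_mod_cast hL
    subst hL0
    rw [PySem.List.pyRange_neg_one_eq_nil (le_refl 0)]
    simp [pvMeasure]
  | succ n ih =>
    intro L hL hle
    have hpos : (0:Int) < L := by omega
    rw [PySem.List.pyRange_neg_one_cons hpos]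
    simp only [List.flatMap_cons]
    rw [pvMeasure_append]
    have ihl := ih (L - 1) (by omega) (by omega)
    have he : ((rem - (L - 1)).toNat) = (rem - L).toNat + 1 := by omega
    rw [he, pow_succ] at ihl
    have hhead : pvMeasure ((PySem.List.pyRange (mg L) (-1) (-1)).map
        (fun g => (f L g, rem - L, some (g, L)))) ≤ (G - 1) * G ^ ((rem - L).toNat) := by
      unfold pvMeasure
      rw [List.map_map]
      have hb : ∀ x ∈ (PySem.List.pyRange (mg L) (-1) (-1)).map
          ((fun e : List (Int × Int) × Int × Option (Int × Int) => pvPot e.2.2 ^ e.2.1.toNat) ∘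
            (fun g => (f L g, rem - L, some (g, L)))),
          x ≤ G ^ ((rem - L).toNat) := by
        intro x hx
        simp only [List.mem_map, Function.comp] at hx
        obtain ⟨g, hg, rfl⟩ := hx
        have hgb := (PySem.List.mem_pyRange_neg_one).1 hg
        have hp : pvPot (some (g, L)) ≤ G := by
          show max (g.toNat + 2) 9 ≤ G
          have := hmg L
          omega
        exact Nat.pow_le_pow_left hp _
      have hs := List.sum_le_card_nsmul _ _ hb
      simp only [smul_eq_mul, List.length_map] at hs
      have hlen : (PySem.List.pyRange (mg L) (-1) (-1)).length ≤ G - 1 := by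
        rw [PySem.List.length_pyRange_neg_one]
        have := hmg L
        omega
      calc _ ≤ (PySem.List.pyRange (mg L) (-1) (-1)).length * G ^ ((rem - L).toNat) := hs
        _ ≤ (G - 1) * G ^ ((rem - L).toNat) := Nat.mul_le_mul_right _ hlen
    have hmul : (G - 1) * G ^ ((rem - L).toNat) + G ^ ((rem - L).toNat)
        = G ^ ((rem - L).toNat) * G := by
      have h1 : G - 1 + 1 = G := by omega
      calc (G - 1) * G ^ ((rem - L).toNat) + G ^ ((rem - L).toNat)
          = (G - 1 + 1) * G ^ ((rem - L).toNat) := by ring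
        _ = G ^ ((rem - L).toNat) * G := by rw [h1]; ring
    omega

-- The children of one popped entry weigh strictly less than the entry itself.
theorem pvChildrenLt (rem L : Int) (mp : Option (Int × Int)) (mg : Int → Int)
    (f : Int → Int → List (Int × Int))
    (hL : L ≤ rem) (hmg : ∀ l, (mg l).toNat + 2 ≤ pvPot mp) :
    pvMeasure ((PySem.List.pyRange L 0 (-1)).flatMap
        (fun level => (PySem.List.pyRange (mg level) (-1) (-1)).map
          (fun g => (f level g, rem - level, some (g, level)))))
      < pvPot mp ^ rem.toNat := by
  have hG := pvPot_ge mp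
  by_cases h0 : (0:Int) ≤ L
  · have key := pvChildrenLe (pvPot mp) rem mg f hG hmg L.toNat L (by omega) hL
    have hpow : 0 < pvPot mp ^ ((rem - L).toNat) := Nat.pow_pos (by omega)
    exact lt_of_lt_of_le (Nat.lt_add_of_pos_right hpow) key
  · rw [PySem.List.pyRange_neg_one_eq_nil (by omega)]
    show pvMeasure [] < pvPot mp ^ rem.toNat
    have hpow : 0 < pvPot mp ^ rem.toNat := Nat.pow_pos (by omega)
    simpa [pvMeasure] using hpow

-- One-step unfolding of the generator at positive fuel (definitional).
theorem pvGen_succ (fuel : Nat) (rem : Int) (mp : Option (Int × Int)) :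
    pvGenStates (fuel + 1) rem mp =
      if rem = 0 then [[]]
      else
        (PySem.List.pyRange
            (min rem (match mp with | some p => p.2 | none => rem)) 0 (-1)).flatMap
          (fun level =>
            (PySem.List.pyRange
                (match mp with
                 | some p => if level = p.2 then p.1 else 8 - 1
                 | none => 8 - 1) (-1) (-1)).flatMap
              (fun gen_idx =>
                (pvGenStates fuel (rem - level) (some (gen_idx, level))).map
                  (fun rest => (gen_idx, level) :: rest))) := rfl

-- A's generator does not depend on the fuel once the fuel exceeds the remaining weight.
theorem pvGen_fuel : ∀ (f1 f2 : Nat) (rem : Int) (mp : Option (Int × Int)),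
    rem.toNat < f1 → rem.toNat < f2 → pvGenStates f1 rem mp = pvGenStates f2 rem mp := by
  intro f1
  induction f1 with
  | zero => intro f2 rem mp h1 _; exact absurd h1 (Nat.not_lt_zero _)
  | succ n ih =>
    intro f2 rem mp h1 h2
    cases f2 with
    | zero => exact absurd h2 (Nat.not_lt_zero _)
    | succ m =>
      simp only [pvGenStates]
      by_cases hr : rem = 0
      · simp [hr]
      · simp only [if_neg hr]
        refine List.flatMap_congr ?_
        intro l hl
        have hb := (PySem.List.mem_pyRange_neg_one).1 hl
        refine List.flatMap_congr ?_
        intro g _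
        rw [ih m (rem - l) (some (g, l)) (by omega) (by omega)]

-- Invariant of the loop: with enough fuel, processing the stack appends, to the results
-- accumulated so far, the DFS yield of every stack entry (prefixed with its accumulator).
theorem pvRun_eq : ∀ (fuel : Nat)
    (stack : List (List (Int × Int) × Int × Option (Int × Int)))
    (results : List (List (Int × Int))), pvMeasure stack ≤ fuel →
    pvRunStack fuel stack results
      = results ++ stack.flatMap
          (fun e => (pvGenStates (e.2.1.toNat + 1) e.2.1 e.2.2).map (fun s => e.1 ++ s)) := by
  intro fuel
  induction fuel with
  | zero =>
    intro stack results hm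
    cases stack with
    | nil => simp [pvRunStack]
    | cons e rest =>
      exfalso
      obtain ⟨acc, rem, mp⟩ := e
      rw [pvMeasure_cons] at hm
      have hp : 0 < pvPot mp ^ rem.toNat := Nat.pow_pos (by have := pvPot_ge mp; omega)
      omega
  | succ n ih =>
    intro stack results hm
    cases stack with
    | nil => simp [pvRunStack]
    | cons e rest =>
      obtain ⟨acc, rem, mp⟩ := e
      rw [pvMeasure_cons] at hm
      by_cases hr : rem = 0
      · subst hr
        have h0 : ((0:Int).toNat) = 0 := rfl
        rw [h0, pow_zero] at hm
        show pvRunStack n rest (results ++ [acc]) = _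
        rw [ih rest (results ++ [acc]) (by omega)]
        have hgen : pvGenStates 1 0 mp = [[]] := by
          show pvGenStates (0 + 1) 0 mp = [[]]
          simp [pvGenStates]
        simp [hgen]
      · simp only [pvRunStack, if_neg hr]
        rw [ih]
        simp only [List.flatMap_cons, List.flatMap_append]
        congr 1
        congr 1
        conv_rhs => rw [pvGen_succ]
        rw [if_neg hr]
        simp only [List.flatMap_map, List.map_flatMap, List.flatMap_assoc, List.map_map]
        refine List.flatMap_congr ?_
        intro l hl
        have hb := (PySem.List.mem_pyRange_neg_one).1 hl
        refine List.flatMap_congr ?_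
        intro g _
        rw [pvGen_fuel ((rem - l).toNat + 1) rem.toNat (rem - l) (some (g, l))
          (by omega) (by omega)]
        refine List.map_congr_left ?_
        intro s _
        simp
        -- fuel bound for the expanded stack (rw side goal)
        rw [pvMeasure_append]
        have hend : pvPot mp ^ rem.toNat - 1 + pvMeasure rest ≤ n := by
          have hp : 0 < pvPot mp ^ rem.toNat := Nat.pow_pos (by have := pvPot_ge mp; omega)
          omega
        refine le_trans (Nat.add_le_add_right (Nat.le_pred_of_lt ?_) (pvMeasure rest)) hend
        apply pvChildrenLt
        · omega
        · intro l
          cases mp with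
          | none =>
            show ((8 - 1 : Int)).toNat + 2 ≤ pvPot none
            decide
          | some p =>
            show (if l = p.2 then p.1 else (8 - 1 : Int)).toNat + 2 ≤ max (p.1.toNat + 2) 9
            by_cases hl : l = p.2
            · rw [if_pos hl]; omega
            · rw [if_neg hl]; omega

-- ===== VERDICT (by name: the statement is the Claim_ definition above) =====
theorem sl3_modes_at_weight_py_spec : Claim_equal_sl3_modes_at_weight_py := by
  intro h_ _
  unfold Spec_sl3_modes_at_weight_py sl3_modes_at_weight_py sl3_modes_at_weight_py_alt
  rw [pvRun_eq (pvMeasure [([], h_, none)]) [([], h_, none)] [] (Nat.le_refl _)]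
  simp
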